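-- pv_equiv track=rewrite | github.com/Pitma/AdventOfCode | 2015/2ab/run.py | calculateTotalArea
-- ===== SOURCE A (Python) =====
-- def calculateArea(l, w, h):
-- 	return 2*l*w + 2*w*h + 2*h*l
--
-- def calculateSmallestSide(l, w, h):
-- 	return min(l*w, w*h, h*l)
--
-- def calculateRibbonLength(l, w, h):
-- 	ordered = sorted([int(l), int(w), int(h)])
-- 	return 2*ordered[0] + 2*ordered[1] + l*w*h
--
-- def calculateTotalArea(boxes):
-- 	totalArea = 0
-- 	totalSmallestSide = 0
-- 	totalRibbonLength = 0
-- 	for box in boxes: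
-- 		l, w, h = box[0], box[1], box[2]
-- 		totalArea += calculateArea(int(l), int(w), int(h))
-- 		totalSmallestSide += calculateSmallestSide(int(l), int(w), int(h))
-- 		totalRibbonLength += calculateRibbonLength(int(l), int(w), int(h))
-- 	return totalArea, totalSmallestSide, totalRibbonLength
-- ===== SOURCE B (Python) =====
-- def calculateTotalArea(boxes):
--     # Group identical boxes first (dict keyed by the box triple), then evaluate the
--     # three geometric formulas ONCE per distinct box and weight by its multiplicity.
--     counts = {}
--     for b in boxes:
--         key = (int(b[0]), int(b[1]), int(b[2]))
--         counts[key] = counts.get(key, 0) + 1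
--     totalArea = 0
--     totalSmallestSide = 0
--     totalRibbonLength = 0
--     for (l, w, h), c in counts.items():
--         totalArea += c * (2 * (l * w + w * h + h * l))
--         totalSmallestSide += c * min(l * w, w * h, h * l)
--         totalRibbonLength += c * (2 * (l + w + h - max(l, w, h)) + l * w * h)
--     return totalArea, totalSmallestSide, totalRibbonLength
-- ===== Notes on version B (the rewrite author's own statement) =====
-- stated objective: alternative
-- what changed: Instead of accumulating per box in one pass, B first builds a multiplicity dictionary of distinct box triples and then evaluates the three formulas once per DISTINCT box weighted by its count, with ribbon computed by the closed form 2*(l+w+h-max(l,w,h))+l*w*h instead of sorting.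
import Mathlib
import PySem

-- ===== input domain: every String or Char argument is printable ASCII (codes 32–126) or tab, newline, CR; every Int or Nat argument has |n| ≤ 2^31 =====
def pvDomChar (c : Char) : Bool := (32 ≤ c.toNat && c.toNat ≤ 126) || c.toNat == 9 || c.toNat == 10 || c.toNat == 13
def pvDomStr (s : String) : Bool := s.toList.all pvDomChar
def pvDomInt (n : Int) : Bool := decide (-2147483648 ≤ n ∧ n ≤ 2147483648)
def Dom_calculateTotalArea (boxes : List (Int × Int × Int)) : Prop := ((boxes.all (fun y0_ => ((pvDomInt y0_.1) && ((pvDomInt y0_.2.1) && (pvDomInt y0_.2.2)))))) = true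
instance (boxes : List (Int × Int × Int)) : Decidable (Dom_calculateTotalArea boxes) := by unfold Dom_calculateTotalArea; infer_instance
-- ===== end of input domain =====

-- B groups identical boxes in a multiplicity dictionary first and evaluates the three
-- formulas once per DISTINCT box weighted by its count (ribbon via a closed form instead
-- of a sort); objective: alternative algorithm, same asymptotic cost.

-- ===== PORT A =====
def calculateArea (l w h : Int) : Int := 2*l*w + 2*w*h + 2*h*l

def calculateSmallestSide (l w h : Int) : Int := min (l*w) (min (w*h) (h*l))

def calculateRibbonLength (l w h : Int) : Int :=
  let ordered := PySem.List.sorted [l, w, h] (fun x => x) false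
  -- ordered has exactly 3 elements, so Python's ordered[0]/ordered[1] never raise;
  -- pyGet? is exact, getD 0 is unreachable.
  2 * ((PySem.List.pyGet? ordered 0).getD 0) + 2 * ((PySem.List.pyGet? ordered 1).getD 0) + l*w*h

def calculateTotalArea (boxes : List (Int × Int × Int)) : Int × Int × Int :=
  boxes.foldl (fun (acc : Int × Int × Int) box =>
      let l := box.1; let w := box.2.1; let h := box.2.2
      (acc.1 + calculateArea l w h,
       acc.2.1 + calculateSmallestSide l w h,
       acc.2.2 + calculateRibbonLength l w h)) (0, 0, 0)

-- ===== PORT B =====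
def calculateTotalArea_alt (boxes : List (Int × Int × Int)) : Int × Int × Int :=
  -- counts[key] = counts.get(key, 0) + 1 over all boxes (int() on Int is the identity)
  let counts := boxes.foldl (fun (d : PySem.Dict (Int × Int × Int) Int) b =>
      let key := (b.1, b.2.1, b.2.2)
      d.insert key (d.getD key 0 + 1)) PySem.Dict.empty
  -- for (l, w, h), c in counts.items(): accumulate the three weighted totals
  counts.items.foldl (fun (acc : Int × Int × Int) kv =>
      let l := kv.1.1; let w := kv.1.2.1; let h := kv.1.2.2; let c := kv.2
      (acc.1 + c * (2 * (l*w + w*h + h*l)),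
       acc.2.1 + c * min (l*w) (min (w*h) (h*l)),
       acc.2.2 + c * (2 * (l + w + h - max l (max w h)) + l*w*h))) (0, 0, 0)

-- ===== PRECONDITION & SPEC =====
def Spec_calculateTotalArea (boxes : List (Int × Int × Int)) (out : Int × Int × Int) : Prop := out = calculateTotalArea_alt boxes
instance (boxes : List (Int × Int × Int)) (out : Int × Int × Int) : Decidable (Spec_calculateTotalArea boxes out) := by unfold Spec_calculateTotalArea; infer_instance

-- ===== CLAIM (what is proved, stated in full; the proofs are below) =====
def Claim_equal_calculateTotalArea : Prop := ∀ (boxes : List (Int × Int × Int)), Dom_calculateTotalArea boxes → Spec_calculateTotalArea boxes (calculateTotalArea boxes)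

-- ===== LEMMAS AND PROOFS =====
theorem ribbon_closed (l w h : Int) :
    calculateRibbonLength l w h = 2 * (l + w + h - max l (max w h)) + l*w*h := by
  unfold calculateRibbonLength
  rcases lt_or_ge w l with h1 | h1 <;> rcases lt_or_ge h w with h2 | h2 <;>
    rcases lt_or_ge h l with h3 | h3 <;>
    simp [PySem.List.sorted, PySem.List.insertBy, PySem.List.pyGet?, PySem.List.pyIdx?,
      h1, h2, h3, not_lt_of_ge] <;> omega

theorem area_closed (l w h : Int) :
    calculateArea l w h = 2 * (l * w + w * h + h * l) := by
  unfold calculateArea; ring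

-- A's loop as three componentwise sums over the input list
theorem foldl_A (boxes : List (Int × Int × Int)) (a b c : Int) :
    boxes.foldl (fun (acc : Int × Int × Int) box =>
      let l := box.1; let w := box.2.1; let h := box.2.2
      (acc.1 + calculateArea l w h,
       acc.2.1 + calculateSmallestSide l w h,
       acc.2.2 + calculateRibbonLength l w h)) (a, b, c)
    = (a + (boxes.map (fun p => calculateArea p.1 p.2.1 p.2.2)).sum,
       b + (boxes.map (fun p => calculateSmallestSide p.1 p.2.1 p.2.2)).sum,
       c + (boxes.map (fun p => calculateRibbonLength p.1 p.2.1 p.2.2)).sum) := by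
  induction boxes generalizing a b c with
  | nil => simp
  | cons x xs ih => simp [List.foldl, ih]; constructor <;> [ring; constructor <;> ring]

-- B's loop over the dict items as three componentwise sums over the items list
theorem foldl_B (L : List ((Int × Int × Int) × Int)) (a b c : Int) :
    L.foldl (fun (acc : Int × Int × Int) kv =>
      let l := kv.1.1; let w := kv.1.2.1; let h := kv.1.2.2; let c := kv.2
      (acc.1 + c * (2 * (l*w + w*h + h*l)),
       acc.2.1 + c * min (l*w) (min (w*h) (h*l)),
       acc.2.2 + c * (2 * (l + w + h - max l (max w h)) + l*w*h))) (a, b, c)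
    = (a + (L.map (fun kv => kv.2 * (2 * (kv.1.1*kv.1.2.1 + kv.1.2.1*kv.1.2.2 + kv.1.2.2*kv.1.1)))).sum,
       b + (L.map (fun kv => kv.2 * min (kv.1.1*kv.1.2.1) (min (kv.1.2.1*kv.1.2.2) (kv.1.2.2*kv.1.1)))).sum,
       c + (L.map (fun kv => kv.2 * (2 * (kv.1.1 + kv.1.2.1 + kv.1.2.2 - max kv.1.1 (max kv.1.2.1 kv.1.2.2)) + kv.1.1*kv.1.2.1*kv.1.2.2))).sum) := by
  induction L generalizing a b c with
  | nil => simp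
  | cons x xs ih => simp [List.foldl, ih]; constructor <;> [ring; constructor <;> ring]

-- List.count does not depend on which (lawful) BEq instance is used
theorem count_beq_congr {α : Type} (i1 i2 : BEq α) [@LawfulBEq α i1] [@LawfulBEq α i2]
    (a : α) (xs : List α) : @List.count α i1 a xs = @List.count α i2 a xs := by
  induction xs with
  | nil => rfl
  | cons b l ih =>
    rw [@List.count_cons, @List.count_cons, ih]
    by_cases hb : b = a <;> simp [hb]

-- a count-weighted sum over the distinct elements equals the plain sum over the list
theorem sum_count_dedup {α : Type} [DecidableEq α] [BEq α] [LawfulBEq α]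
    (xs : List α) (f : α → Int) :
    ((PySem.Set.ofList xs).map (fun k => (List.count k xs : Int) * f k)).sum
      = (xs.map f).sum := by
  have htf : (PySem.Set.ofList xs).toFinset = xs.toFinset := by
    ext y; simp [PySem.Set.mem_ofList]
  have h1 := List.sum_toFinset (l := PySem.Set.ofList xs)
      (fun k => (List.count k xs : Int) * f k) (PySem.Set.nodup_ofList xs)
  rw [← h1, htf, Finset.sum_list_map_count]
  refine Finset.sum_congr rfl (fun m _ => ?_)
  rw [nsmul_eq_mul, count_beq_congr _ (@instBEqOfDecidableEq α _)]

-- ===== VERDICT (by name: the statement is the Claim_ definition above) =====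
theorem calculateTotalArea_spec : Claim_equal_calculateTotalArea := by
  intro boxes _
  unfold Spec_calculateTotalArea calculateTotalArea calculateTotalArea_alt
  have hc : (fun (d : PySem.Dict (Int × Int × Int) Int) (b : Int × Int × Int) =>
      let key := (b.1, b.2.1, b.2.2)
      d.insert key (d.getD key 0 + 1))
      = fun d b => d.insert b (d.getD b 0 + 1) := by
    funext d b; rfl
  rw [hc, PySem.Dict.foldl_insert_getD_add_one_eq_counter, foldl_A, foldl_B,
    PySem.Dict.items_counter]
  simp only [List.map_map, Function.comp_def, zero_add]
  refine Prod.ext ?_ (Prod.ext ?_ ?_)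
  · dsimp only
    rw [sum_count_dedup boxes (fun k => 2 * (k.1*k.2.1 + k.2.1*k.2.2 + k.2.2*k.1))]
    exact congrArg List.sum (List.map_congr_left fun p _ => area_closed p.1 p.2.1 p.2.2)
  · dsimp only
    rw [sum_count_dedup boxes (fun k => min (k.1*k.2.1) (min (k.2.1*k.2.2) (k.2.2*k.1)))]
    rfl
  · dsimp only
    rw [sum_count_dedup boxes
      (fun k => 2 * (k.1 + k.2.1 + k.2.2 - max k.1 (max k.2.1 k.2.2)) + k.1*k.2.1*k.2.2)]
    exact congrArg List.sum (List.map_congr_left fun p _ => ribbon_closed p.1 p.2.1 p.2.2)
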